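-- pv_equiv track=rewrite | github.com/LucScheepens/GeoVis | algo.py | identify_wrong_combos
-- ===== SOURCE A (Python) =====
-- def contains_equals(route1, route2):
--     """A function that checks for two segments if they use the same slot at the same node"""
--     for node1, slot1 in route1:
--         for node2, slot2 in route2:
--             if node1 == node2 and slot1 == slot2:
--                 return True
--
--     return False
--
-- def identify_wrong_combos(dot_product):
--     """filter out combinations that have paths use the same slot at the same node"""
--     to_reject = []
--     for configuration in dot_product:
--         for i in range(len(configuration)):
--             for j in range(i+1, len(configuration)):
--                 if contains_equals(configuration[i], configuration[j]):
--                     to_reject.append(configuration)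
--     return to_reject
-- ===== SOURCE B (Python) =====
-- def identify_wrong_combos(dot_product):
--     """filter out combinations that have paths use the same slot at the same node"""
--     to_reject = []
--     for configuration in dot_product:
--         # invert: (node, slot) key -> set of route indices using it
--         index = {}
--         for idx, route in enumerate(configuration):
--             for key in route:
--                 index.setdefault(key, set()).add(idx)
--         # distinct unordered colliding pairs (i, j) with i < j
--         pairs = set()
--         for ids in index.values():
--             s = sorted(ids)
--             while s:
--                 i, s = s[0], s[1:]
--                 for j in s:
--                     pairs.add((i, j))
--         to_reject.extend([configuration] * len(pairs))
--     return to_reject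
-- ===== Notes on version B (the rewrite author's own statement) =====
-- stated objective: alternative
-- what changed: B replaces A's all-pairs-of-routes scan (each pair compared slot-by-slot) with a per-configuration inverted index (node,slot) -> route indices, from which the distinct colliding unordered route pairs are derived directly; the configuration is appended once per distinct colliding pair, as in A.
import Mathlib
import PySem

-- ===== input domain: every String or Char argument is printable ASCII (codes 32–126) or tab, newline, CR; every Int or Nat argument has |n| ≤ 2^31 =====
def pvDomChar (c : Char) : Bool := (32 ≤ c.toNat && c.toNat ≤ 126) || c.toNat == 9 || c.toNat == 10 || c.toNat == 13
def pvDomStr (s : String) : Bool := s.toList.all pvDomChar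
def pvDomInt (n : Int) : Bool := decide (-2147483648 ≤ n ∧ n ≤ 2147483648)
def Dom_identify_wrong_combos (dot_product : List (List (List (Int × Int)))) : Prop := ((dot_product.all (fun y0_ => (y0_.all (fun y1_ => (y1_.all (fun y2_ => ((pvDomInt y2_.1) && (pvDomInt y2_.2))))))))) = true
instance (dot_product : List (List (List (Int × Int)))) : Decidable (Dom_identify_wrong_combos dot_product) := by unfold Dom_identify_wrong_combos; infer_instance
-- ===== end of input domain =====

-- B replaces A's all-pairs-of-routes × all-pairs-of-slots scan by a per-configuration
-- inverted index (node,slot) → route indices from which the distinct colliding route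
-- pairs are derived directly (objective: alternative algorithm, same measured cost).

-- ===== PORT A =====
def contains_equals (route1 route2 : List (Int × Int)) : Bool :=
  route1.any fun p => route2.any fun q => p.1 == q.1 && p.2 == q.2

def identify_wrong_combos (dot_product : List (List (List (Int × Int)))) : List (List (List (Int × Int))) :=
  dot_product.foldl
    (fun acc configuration =>
      (PySem.List.pyRange 0 (configuration.length : Int) 1).foldl
        (fun acc i =>
          (PySem.List.pyRange (i + 1) (configuration.length : Int) 1).foldl
            (fun acc j =>
              if contains_equals (PySem.List.pyGetD configuration i [])
                  (PySem.List.pyGetD configuration j []) then acc ++ [configuration] else acc)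
            acc)
        acc)
    []

-- ===== PORT B =====
-- 'index.setdefault(key, set()).add(idx)' is exactly 'index[key] = index.get(key, set()) ∪ {idx}',
-- i.e. Dict.modify (same insertion position, same resulting value).
def ic_index (cfg : List (List (Int × Int))) : PySem.Dict (Int × Int) (PySem.Set Int) :=
  (PySem.List.enumerate cfg 0).foldl
    (fun d p => p.2.foldl
      (fun d key => d.modify key PySem.Set.empty (fun s => PySem.Set.add s p.1)) d)
    PySem.Dict.empty

-- the 'while s: i, s = s[0], s[1:]; for j in s: pairs.add((i, j))' loop
def ic_addPairs : List Int → PySem.Set (Int × Int) → PySem.Set (Int × Int)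
  | [], ps => ps
  | i :: t, ps => ic_addPairs t (t.foldl (fun ps j => PySem.Set.add ps (i, j)) ps)

def ic_pairs (cfg : List (List (Int × Int))) : PySem.Set (Int × Int) :=
  (ic_index cfg).values.foldl
    (fun ps ids => ic_addPairs (PySem.List.sorted ids (fun x => x) false) ps)
    PySem.Set.empty

def identify_wrong_combos_alt (dot_product : List (List (List (Int × Int)))) : List (List (List (Int × Int))) :=
  dot_product.foldl
    (fun acc configuration =>
      acc ++ PySem.List.pyRepeat [configuration] (PySem.Set.len (ic_pairs configuration)))
    []

-- ===== PRECONDITION & SPEC =====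
def Spec_identify_wrong_combos (dot_product : List (List (List (Int × Int)))) (out : List (List (List (Int × Int)))) : Prop := out = identify_wrong_combos_alt dot_product
instance (dot_product : List (List (List (Int × Int)))) (out : List (List (List (Int × Int)))) : Decidable (Spec_identify_wrong_combos dot_product out) := by unfold Spec_identify_wrong_combos; infer_instance

-- ===== CLAIM (what is proved, stated in full; the proofs are below) =====
def Claim_equal_identify_wrong_combos : Prop := ∀ (dot_product : List (List (List (Int × Int)))), Dom_identify_wrong_combos dot_product → Spec_identify_wrong_combos dot_product (identify_wrong_combos dot_product)

-- ===== LEMMAS AND PROOFS =====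

-- the canonical list of colliding index pairs A iterates over
def pvPL (cfg : List (List (Int × Int))) : List (Int × Int) :=
  (PySem.List.pyRange 0 (cfg.length : Int) 1).flatMap fun i =>
    ((PySem.List.pyRange (i + 1) (cfg.length : Int) 1).filter fun j =>
      contains_equals (PySem.List.pyGetD cfg i []) (PySem.List.pyGetD cfg j [])).map fun j => (i, j)

theorem contains_equals_iff (r1 r2 : List (Int × Int)) :
    contains_equals r1 r2 = true ↔ ∃ p ∈ r1, p ∈ r2 := by
  simp only [contains_equals, List.any_eq_true, Bool.and_eq_true, beq_iff_eq]
  constructor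
  · rintro ⟨p, hp, q, hq, h1, h2⟩
    exact ⟨p, hp, by rw [show p = q from Prod.ext_iff.mpr ⟨h1, h2⟩]; exact hq⟩
  · rintro ⟨p, hp, hq⟩
    exact ⟨p, hp, p, hq, rfl, rfl⟩

theorem mem_pvPL (cfg : List (List (Int × Int))) (z : Int × Int) :
    z ∈ pvPL cfg ↔ 0 ≤ z.1 ∧ z.1 < z.2 ∧ z.2 < (cfg.length : Int) ∧
      contains_equals (PySem.List.pyGetD cfg z.1 []) (PySem.List.pyGetD cfg z.2 []) = true := by
  obtain ⟨x, y⟩ := z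
  simp only [pvPL, List.mem_flatMap, List.mem_map, List.mem_filter, PySem.List.mem_pyRange_one]
  constructor
  · rintro ⟨i, ⟨hi0, hin⟩, j, ⟨⟨hj1, hj2⟩, hc⟩, h⟩
    obtain ⟨rfl, rfl⟩ := Prod.mk.injEq .. ▸ h
    exact ⟨hi0, by omega, hj2, hc⟩
  · rintro ⟨h0, hlt, hn, hc⟩
    exact ⟨x, ⟨h0, by omega⟩, y, ⟨⟨by omega, hn⟩, hc⟩, rfl⟩

theorem nodup_pvPL (cfg : List (List (Int × Int))) : (pvPL cfg).Nodup := by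
  unfold pvPL
  rw [List.flatMap_def, List.nodup_flatten]
  constructor
  · intro l hl
    simp only [List.mem_map] at hl
    obtain ⟨i, _, rfl⟩ := hl
    exact List.Nodup.map (fun a b h => by simpa using h)
      (List.Nodup.filter _ (PySem.List.nodup_pyRange_one _ _))
  · rw [List.pairwise_map]
    refine (PySem.List.pairwise_lt_pyRange_one 0 (cfg.length : Int)).imp ?_
    intro i i' hlt z hz hz'
    simp only [List.mem_map, List.mem_filter] at hz hz'
    obtain ⟨j, _, rfl⟩ := hz
    obtain ⟨j', _, h⟩ := hz'
    have : i' = i := congrArg Prod.fst h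
    omega

-- the inner loop of B's index build, as one getD rewrite
theorem ic_getD_inner (route : List (Int × Int)) (d : PySem.Dict (Int × Int) (PySem.Set Int))
    (idx : Int) (k : Int × Int) :
    (route.foldl (fun d key => d.modify key PySem.Set.empty (fun s => PySem.Set.add s idx)) d).getD k PySem.Set.empty
      = if k ∈ route then PySem.Set.add (d.getD k PySem.Set.empty) idx
        else d.getD k PySem.Set.empty := by
  induction route generalizing d with
  | nil => simp
  | cons r t ih =>
    simp only [List.foldl_cons, ih, List.mem_cons, PySem.Dict.getD_modify]
    have hid : ∀ s : PySem.Set Int, (PySem.Set.add s idx).add idx = PySem.Set.add s idx :=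
      fun s => PySem.Set.add_of_mem ((PySem.Set.mem_add _ _ _).mpr (Or.inr rfl))
    by_cases hk : k = r <;> by_cases ht : k ∈ t
    · simp [hk, ht, hid]
    · simp [hk, ht]
    · simp [hk, ht]
    · simp [hk, ht]

theorem ic_mem_getD_build (cfg : List (List (Int × Int))) (s0 : Int)
    (d : PySem.Dict (Int × Int) (PySem.Set Int)) (k : Int × Int) (x : Int) :
    (x ∈ ((PySem.List.enumerate cfg s0).foldl
        (fun d p => p.2.foldl
          (fun d key => d.modify key PySem.Set.empty (fun s => PySem.Set.add s p.1)) d)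
        d).getD k PySem.Set.empty)
      ↔ x ∈ d.getD k PySem.Set.empty ∨
          ∃ (a : Nat) (h : a < cfg.length), x = s0 + (a : Int) ∧ k ∈ cfg[a] := by
  induction cfg generalizing s0 d with
  | nil => simp [PySem.List.enumerate]
  | cons c t ih =>
    rw [PySem.List.enumerate_cons, List.foldl_cons, ih]
    rw [ic_getD_inner]
    constructor
    · rintro (h | ⟨a, ha, rfl, hk⟩)
      · split_ifs at h with hc
        · rcases (PySem.Set.mem_add _ _ _).mp h with h | rfl
          · exact Or.inl h
          · exact Or.inr ⟨0, by simp, by simp, by simpa using hc⟩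
        · exact Or.inl h
      · exact Or.inr ⟨a + 1, by simpa using ha, by push_cast; ring, by simpa using hk⟩
    · rintro (h | ⟨a, ha, rfl, hk⟩)
      · left; split_ifs with hc
        · exact (PySem.Set.mem_add _ _ _).mpr (Or.inl h)
        · exact h
      · match a with
        | 0 =>
          left
          have hc : k ∈ c := by simpa using hk
          rw [if_pos hc]
          exact (PySem.Set.mem_add _ _ _).mpr (Or.inr (by simp))
        | a + 1 =>
          exact Or.inr ⟨a, by simpa using ha, by push_cast; ring, by simpa using hk⟩

theorem mem_getD_ic_index (cfg : List (List (Int × Int))) (k : Int × Int) (x : Int) :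
    x ∈ (ic_index cfg).getD k PySem.Set.empty ↔
      ∃ (a : Nat) (h : a < cfg.length), x = (a : Int) ∧ k ∈ cfg[a] := by
  rw [ic_index, ic_mem_getD_build]
  simp only [PySem.Dict.getD_empty]
  constructor
  · rintro (h | ⟨a, ha, rfl, hk⟩)
    · simp [PySem.Set.empty] at h
    · exact ⟨a, ha, by omega, hk⟩
  · rintro ⟨a, ha, rfl, hk⟩
    exact Or.inr ⟨a, ha, by omega, hk⟩

theorem ic_nodup_getD_build (cfg : List (List (Int × Int))) (s0 : Int)
    (d : PySem.Dict (Int × Int) (PySem.Set Int))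
    (hd : ∀ k, (d.getD k PySem.Set.empty).Nodup) (k : Int × Int) :
    (((PySem.List.enumerate cfg s0).foldl
        (fun d p => p.2.foldl
          (fun d key => d.modify key PySem.Set.empty (fun s => PySem.Set.add s p.1)) d)
        d).getD k PySem.Set.empty).Nodup := by
  induction cfg generalizing s0 d with
  | nil => exact hd k
  | cons c t ih =>
    rw [PySem.List.enumerate_cons, List.foldl_cons]
    refine ih _ _ (fun k' => ?_)
    rw [ic_getD_inner]
    split_ifs with h
    · exact PySem.Set.nodup_add _ _ (hd k')
    · exact hd k'

theorem nodup_getD_ic_index (cfg : List (List (Int × Int))) (k : Int × Int) :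
    ((ic_index cfg).getD k PySem.Set.empty).Nodup := by
  exact ic_nodup_getD_build cfg 0 _ (fun k' => by simp [PySem.Set.empty]) k

theorem nodup_keys_ic_outer (l : List (Int × List (Int × Int)))
    (d : PySem.Dict (Int × Int) (PySem.Set Int)) (h : d.keys.Nodup) :
    (l.foldl (fun d p => p.2.foldl
        (fun d key => d.modify key PySem.Set.empty (fun s => PySem.Set.add s p.1)) d) d).keys.Nodup := by
  induction l generalizing d with
  | nil => exact h
  | cons p t ih =>
    exact ih _ (PySem.Dict.nodup_keys_foldl_modify_key p.2 (fun x => x) PySem.Set.empty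
      (fun _ _ s => PySem.Set.add s p.1) d h)

theorem nodup_keys_ic_index (cfg : List (List (Int × Int))) : (ic_index cfg).keys.Nodup :=
  nodup_keys_ic_outer _ _ (by simp)

theorem nodup_ids_of_mem_values (cfg : List (List (Int × Int))) (ids : PySem.Set Int)
    (h : ids ∈ (ic_index cfg).values) : ids.Nodup := by
  rw [PySem.Dict.values_eq_map_keys _ (nodup_keys_ic_index cfg) PySem.Set.empty] at h
  obtain ⟨k, _, rfl⟩ := List.mem_map.mp h
  exact nodup_getD_ic_index cfg k

theorem ic_sorted_strict (ids : PySem.Set Int) (h : ids.Nodup) :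
    (PySem.List.sorted ids (fun x => x) false).Pairwise (· < ·) := by
  have h1 := PySem.List.sorted_pairwise ids (fun x => x)
  have h2 : (PySem.List.sorted ids (fun x => x) false).Nodup :=
    (PySem.List.sorted_perm ids (fun x => x) false).nodup_iff.mpr h
  exact (h1.and h2).imp fun ⟨hle, hne⟩ => lt_of_le_of_ne hle hne

theorem mem_ic_addPairs (s : List Int) (ps : PySem.Set (Int × Int))
    (hs : s.Pairwise (· < ·)) (z : Int × Int) :
    z ∈ ic_addPairs s ps ↔ z ∈ ps ∨ (z.1 ∈ s ∧ z.2 ∈ s ∧ z.1 < z.2) := by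
  induction s generalizing ps with
  | nil => simp [ic_addPairs]
  | cons i t ih =>
    have hp := List.pairwise_cons.mp hs
    rw [ic_addPairs, ih _ hp.2, PySem.Set.mem_foldl_add]
    constructor
    · rintro ((h | ⟨b, hb, rfl⟩) | ⟨h1, h2, h3⟩)
      · exact Or.inl h
      · exact Or.inr ⟨by simp, by simp [hb], hp.1 b hb⟩
      · exact Or.inr ⟨by simp [h1], by simp [h2], h3⟩
    · rintro (h | ⟨h1, h2, h3⟩)
      · exact Or.inl (Or.inl h)
      · rcases List.mem_cons.mp h1 with hz1 | hz1
        · rcases List.mem_cons.mp h2 with hz2 | hz2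
          · omega
          · exact Or.inl (Or.inr ⟨z.2, hz2, by rw [← hz1]⟩)
        · rcases List.mem_cons.mp h2 with hz2 | hz2
          · have := hp.1 z.1 hz1; omega
          · exact Or.inr ⟨hz1, hz2, h3⟩

theorem nodup_ic_addPairs (s : List Int) (ps : PySem.Set (Int × Int)) (h : ps.Nodup) :
    (ic_addPairs s ps).Nodup := by
  induction s generalizing ps with
  | nil => exact h
  | cons i t ih =>
    rw [ic_addPairs]
    refine ih _ ?_
    clear ih
    induction t generalizing ps with
    | nil => exact h
    | cons j t' ih' => exact ih' _ (PySem.Set.nodup_add _ _ h)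

theorem mem_ic_pairs_fold (vs : List (PySem.Set Int)) (ps : PySem.Set (Int × Int))
    (hv : ∀ ids ∈ vs, List.Nodup ids) (z : Int × Int) :
    z ∈ vs.foldl (fun ps ids => ic_addPairs (PySem.List.sorted ids (fun x => x) false) ps) ps ↔
      z ∈ ps ∨ ∃ ids ∈ vs, z.1 ∈ ids ∧ z.2 ∈ ids ∧ z.1 < z.2 := by
  induction vs generalizing ps with
  | nil => simp
  | cons ids t ih =>
    rw [List.foldl_cons, ih _ (fun i hi => hv i (List.mem_cons_of_mem _ hi)),
      mem_ic_addPairs _ _ (ic_sorted_strict ids (hv ids (List.mem_cons_self)))]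
    simp only [PySem.List.mem_sorted, List.mem_cons]
    constructor
    · rintro ((h | h) | ⟨ids', h1, h2⟩)
      · exact Or.inl h
      · exact Or.inr ⟨ids, Or.inl rfl, h⟩
      · exact Or.inr ⟨ids', Or.inr h1, h2⟩
    · rintro (h | ⟨ids', (rfl | h1), h2⟩)
      · exact Or.inl (Or.inl h)
      · exact Or.inl (Or.inr h2)
      · exact Or.inr ⟨ids', h1, h2⟩

theorem mem_ic_pairs (cfg : List (List (Int × Int))) (z : Int × Int) :
    z ∈ ic_pairs cfg ↔ ∃ ids ∈ (ic_index cfg).values, z.1 ∈ ids ∧ z.2 ∈ ids ∧ z.1 < z.2 := by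
  rw [ic_pairs, mem_ic_pairs_fold _ _ (nodup_ids_of_mem_values cfg)]
  simp [PySem.Set.empty]

theorem nodup_ic_pairs (cfg : List (List (Int × Int))) : (ic_pairs cfg).Nodup := by
  rw [ic_pairs]
  generalize (ic_index cfg).values = vs
  have h : (PySem.Set.empty : PySem.Set (Int × Int)).Nodup := by simp [PySem.Set.empty]
  generalize (PySem.Set.empty : PySem.Set (Int × Int)) = ps at h ⊢
  induction vs generalizing ps with
  | nil => exact h
  | cons ids t ih => exact ih _ (nodup_ic_addPairs _ _ h)

theorem ic_pairs_perm (cfg : List (List (Int × Int))) : (ic_pairs cfg).Perm (pvPL cfg) := by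
  rw [List.perm_ext_iff_of_nodup (nodup_ic_pairs cfg) (nodup_pvPL cfg)]
  intro z
  rw [mem_ic_pairs, mem_pvPL]
  constructor
  · rintro ⟨ids, hids, h1, h2, h3⟩
    rw [PySem.Dict.values_eq_map_keys _ (nodup_keys_ic_index cfg) PySem.Set.empty] at hids
    obtain ⟨k, _, rfl⟩ := List.mem_map.mp hids
    obtain ⟨a, ha, hz1, hka⟩ := (mem_getD_ic_index cfg k z.1).mp h1
    obtain ⟨b, hb, hz2, hkb⟩ := (mem_getD_ic_index cfg k z.2).mp h2
    refine ⟨by omega, h3, by omega, ?_⟩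
    rw [hz1, hz2, PySem.List.pyGetD_natCast, PySem.List.pyGetD_natCast,
      List.getD_eq_getElem _ _ ha, List.getD_eq_getElem _ _ hb, contains_equals_iff]
    exact ⟨k, hka, hkb⟩
  · rintro ⟨h0, hlt, hn, hc⟩
    have hz1 : z.1 = (z.1.toNat : Int) := (Int.toNat_of_nonneg h0).symm
    have hz2 : z.2 = (z.2.toNat : Int) := (Int.toNat_of_nonneg (by omega)).symm
    have ha : z.1.toNat < cfg.length := by omega
    have hb : z.2.toNat < cfg.length := by omega
    rw [hz1, hz2, PySem.List.pyGetD_natCast, PySem.List.pyGetD_natCast,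
      List.getD_eq_getElem _ _ ha, List.getD_eq_getElem _ _ hb, contains_equals_iff] at hc
    obtain ⟨k, hka, hkb⟩ := hc
    have h1 : z.1 ∈ (ic_index cfg).getD k PySem.Set.empty :=
      (mem_getD_ic_index cfg k _).mpr ⟨z.1.toNat, ha, hz1, hka⟩
    have h2 : z.2 ∈ (ic_index cfg).getD k PySem.Set.empty :=
      (mem_getD_ic_index cfg k _).mpr ⟨z.2.toNat, hb, hz2, hkb⟩
    have hkey : k ∈ (ic_index cfg).keys := by
      by_contra hk
      have : (ic_index cfg).contains k = false := by
        rcases Bool.eq_false_or_eq_true ((ic_index cfg).contains k) with h | h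
        · exact absurd ((PySem.Dict.contains_iff_mem_keys _ _).mp h) hk
        · exact h
      rw [PySem.Dict.getD_of_not_contains _ _ this] at h1
      simp [PySem.Set.empty] at h1
    refine ⟨(ic_index cfg).getD k PySem.Set.empty, ?_, h1, h2, hlt⟩
    rw [PySem.Dict.values_eq_map_keys _ (nodup_keys_ic_index cfg) PySem.Set.empty]
    exact List.mem_map.mpr ⟨k, hkey, rfl⟩

theorem per_config (cfg : List (List (Int × Int))) :
    (pvPL cfg).map (fun _ => cfg) = PySem.List.pyRepeat [cfg] (PySem.Set.len (ic_pairs cfg)) := by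
  rw [List.map_const', ← (ic_pairs_perm cfg).length_eq, PySem.List.pyRepeat_singleton]
  simp [PySem.Set.len]

-- ===== VERDICT (by name: the statement is the Claim_ definition above) =====
theorem identify_wrong_combos_spec : Claim_equal_identify_wrong_combos := by
  intro dp _
  show identify_wrong_combos dp = identify_wrong_combos_alt dp
  rw [identify_wrong_combos, identify_wrong_combos_alt]
  have hA : ∀ (acc : List (List (List (Int × Int)))), ∀ cfg ∈ dp,
      (PySem.List.pyRange 0 (cfg.length : Int) 1).foldl
        (fun acc i => (PySem.List.pyRange (i + 1) (cfg.length : Int) 1).foldl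
          (fun acc j => if contains_equals (PySem.List.pyGetD cfg i [])
              (PySem.List.pyGetD cfg j []) then acc ++ [cfg] else acc) acc) acc
      = acc ++ (pvPL cfg).map (fun _ => cfg) := by
    intro acc cfg _
    have h1 : ∀ (acc : List (List (List (Int × Int)))),
        ∀ i ∈ PySem.List.pyRange 0 (cfg.length : Int) 1,
        (PySem.List.pyRange (i + 1) (cfg.length : Int) 1).foldl
          (fun acc j => if contains_equals (PySem.List.pyGetD cfg i [])
              (PySem.List.pyGetD cfg j []) then acc ++ [cfg] else acc) acc
        = acc ++ ((PySem.List.pyRange (i + 1) (cfg.length : Int) 1).filter fun j =>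
            contains_equals (PySem.List.pyGetD cfg i [])
              (PySem.List.pyGetD cfg j [])).map (fun _ => cfg) :=
      fun acc i _ => PySem.List.foldl_append_if _ (fun _ => cfg) _ acc
    rw [PySem.List.foldl_congr_mem _ _ _ acc h1, PySem.List.foldl_append_eq_flatMap]
    congr 1
    rw [pvPL, List.map_flatMap]
    refine List.flatMap_congr fun i _ => ?_
    rw [List.map_map]
    exact (List.map_congr_left fun x _ => rfl).symm
  rw [PySem.List.foldl_congr_mem dp _ (fun acc cfg => acc ++ (pvPL cfg).map (fun _ => cfg)) [] hA]
  rw [PySem.List.foldl_append_eq_flatMap, PySem.List.foldl_append_eq_flatMap]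
  exact congrArg _ (List.flatMap_congr fun cfg _ => per_config cfg)
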